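-- pv_equiv track=rewrite | github.com/smaugsboots/advent-of-code-2023 | day-1.2.py | calib_value
-- ===== SOURCE A (Python) =====
-- from operator import itemgetter
--
-- def calib_value(line: str) -> int:
--     """Function to find calibration value of a line."""
--
--     digits = []
--
--     # Find numbers in digit form
--     count = 0
--     for char in line:
--         if char.isdigit():
--             digits.append([count, char])
--         count += 1
--
--     # Find numbers in string form
--     numbers = ["one", "two", "three", "four", "five", "six", "seven", "eight", "nine"]
--     for i in range(len(numbers)):
--         start = 0
--         while True:
--             index = line.find(numbers[i], start)
--             if index >= 0:
--                 digits.append([index, str(i+1)])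
--                 start = index + 1
--             else:
--                 break
--
--     # Sort numbers in by position in the line
--     digits = sorted(digits, key=itemgetter(0))
--
--     # Calculate calibration value
--     value = digits[0][1] + digits[-1][1]
--     return int(value)
-- ===== SOURCE B (Python) =====
-- WORDS = [("one", "1"), ("two", "2"), ("three", "3"), ("four", "4"),
--          ("five", "5"), ("six", "6"), ("seven", "7"), ("eight", "8"), ("nine", "9")]
--
-- def calib_value(line: str) -> int:
--     """Single left-to-right pass: track only the first and last digit found."""
--     first = None
--     last = None
--     for i in range(len(line)):
--         d = None
--         if line[i].isdigit():
--             d = line[i]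
--         else:
--             for word, val in WORDS:
--                 if line.startswith(word, i):
--                     d = val
--                     break
--         if d is not None:
--             if first is None:
--                 first = d
--             last = d
--     return int(first + last)
-- ===== Notes on version B (the rewrite author's own statement) =====
-- stated objective: simpler
-- what changed: B replaces A's collect-all-matches (digit scan plus nine repeated find loops) followed by a sort with one indexed left-to-right pass that keeps only the first and last digit/word match.
import Mathlib
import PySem

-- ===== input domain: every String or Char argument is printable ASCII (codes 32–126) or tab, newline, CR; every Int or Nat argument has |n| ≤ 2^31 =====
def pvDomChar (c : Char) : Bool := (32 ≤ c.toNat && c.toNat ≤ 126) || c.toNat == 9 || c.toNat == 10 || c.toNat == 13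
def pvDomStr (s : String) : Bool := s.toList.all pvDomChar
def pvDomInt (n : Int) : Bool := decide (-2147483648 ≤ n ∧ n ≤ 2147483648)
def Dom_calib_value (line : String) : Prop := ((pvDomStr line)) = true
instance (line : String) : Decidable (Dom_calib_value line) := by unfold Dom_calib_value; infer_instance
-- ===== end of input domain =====

-- B replaces A's collect-everything-then-sort strategy by a single indexed pass that keeps
-- only the first and the last digit/word-digit seen (objective: simpler, no sort).

-- ===== PORT A =====
-- the nine spelled-out digit words of A
def pvWordsA : List (List Char) :=
  [['o','n','e'], ['t','w','o'], ['t','h','r','e','e'], ['f','o','u','r'],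
   ['f','i','v','e'], ['s','i','x'], ['s','e','v','e','n'], ['e','i','g','h','t'],
   ['n','i','n','e']]

-- A's first loop: "for char in line: if char.isdigit(): digits.append([count, char]); count += 1"
def pvDigitLoopA (cs : List Char) (count : Int) (acc : List (Int × List Char)) :
    List (Int × List Char) :=
  match cs with
  | [] => acc
  | c :: t =>
      pvDigitLoopA t (count + 1) (if PySem.Chars.isdigit c then acc ++ [(count, [c])] else acc)

-- A's inner "while True" with line.find(word, start); the fuel only makes the loop total
-- (each round moves start past the found index, so cs.length + 1 rounds always suffice)
def pvFindLoopA (cs w v : List Char) (start : Int) (acc : List (Int × List Char)) :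
    Nat → List (Int × List Char)
  | 0 => acc
  | fuel + 1 =>
      let index := PySem.Chars.findFrom cs w start
      if 0 ≤ index then pvFindLoopA cs w v (index + 1) (acc ++ [(index, v)]) fuel
      else acc

def calib_value (line : String) : Int :=
  let cs := line.toList
  let digits0 := pvDigitLoopA cs 0 []
  let digits1 := (PySem.List.pyRange 0 (pvWordsA.length : Int) 1).foldl
    (fun acc i =>
      pvFindLoopA cs (PySem.List.pyGetD pvWordsA i []) (PySem.Int.toChars (i + 1)) 0 acc
        (cs.length + 1)) digits0
  let digits := PySem.List.sorted digits1 (fun p => p.1) false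
  -- digits[0][1] + digits[-1][1]; int(value): none only when digits = [] (A raises there; outside Pre_)
  match PySem.List.pyGet? digits 0, PySem.List.pyGet? digits (-1) with
  | some a, some b => (PySem.Int.ofChars? (a.2 ++ b.2)).getD 0
  | _, _ => 0

-- ===== PORT B =====
-- B's word table (word, digit character)
def pvWordsB : List (List Char × Char) :=
  [(['o','n','e'], '1'), (['t','w','o'], '2'), (['t','h','r','e','e'], '3'),
   (['f','o','u','r'], '4'), (['f','i','v','e'], '5'), (['s','i','x'], '6'),
   (['s','e','v','e','n'], '7'), (['e','i','g','h','t'], '8'), (['n','i','n','e'], '9')]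

-- B's inner "for word, val in WORDS: if line.startswith(word, i): d = val; break"
-- (line.startswith(word, i) for 0 ≤ i ≤ len(line) is exactly startswith on the drop)
def pvFirstWordB (cs : List Char) : List (List Char × Char) → Option Char
  | [] => none
  | (w, v) :: t => if PySem.Chars.startswith cs w then some v else pvFirstWordB cs t

-- B's per-position test: the digit character found at position i, if any
def pvMatchB (cs : List Char) (i : Nat) : Option Char :=
  match cs[i]? with
  | some c => if PySem.Chars.isdigit c then some c else pvFirstWordB (cs.drop i) pvWordsB
  | none => none

def calib_value_alt (line : String) : Int :=
  let cs := line.toList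
  let s := (List.range cs.length).foldl
    (fun (s : Option Char × Option Char) i =>
      match pvMatchB cs i with
      | some d => (some (s.1.getD d), some d)
      | none => s) (none, none)
  -- int(first + last); none only when no match at all (B raises there; outside Pre_)
  match s.1 with
  | some f =>
      match s.2 with
      | some l => (PySem.Int.ofChars? [f, l]).getD 0
      | none => 0
  | none => 0

-- ===== PRECONDITION & SPEC =====
-- Pre_ excludes exactly the lines with no digit and no spelled-out digit word, on which the
-- Python A raises IndexError (and B raises TypeError).
def Pre_calib_value (line : String) : Prop :=
  line.toList.any PySem.Chars.isdigit = true ∨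
  ([['o','n','e'], ['t','w','o'], ['t','h','r','e','e'], ['f','o','u','r'],
      ['f','i','v','e'], ['s','i','x'], ['s','e','v','e','n'], ['e','i','g','h','t'],
      ['n','i','n','e']].any (fun w => PySem.Chars.isIn w line.toList)) = true
instance (line : String) : Decidable (Pre_calib_value line) := by
  unfold Pre_calib_value; infer_instance
def pvWitness_calib_value : String := "x1"

def Spec_calib_value (line : String) (out : Int) : Prop := out = calib_value_alt line
instance (line : String) (out : Int) : Decidable (Spec_calib_value line out) := by
  unfold Spec_calib_value; infer_instance

-- ===== CLAIM (what is proved, stated in full; the proofs are below) =====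
def Claim_equal_calib_value : Prop :=
  ∀ (line : String), Dom_calib_value line → Pre_calib_value line →
    Spec_calib_value line (calib_value line)

-- ===== LEMMAS AND PROOFS =====

-- the canonical match list: positions 0..len-1 with B's per-position digit value
def pvM (cs : List Char) : List (Nat × Char) :=
  (List.range cs.length).filterMap (fun i => (pvMatchB cs i).map ((i, ·)))

def pvMA (cs : List Char) : List (Int × List Char) :=
  (pvM cs).map (fun p => ((p.1 : Int), [p.2]))


-- the result of A's digit loop, accumulator-free
def pvDL (cs : List Char) (count : Int) : List (Int × List Char) :=
  match cs with
  | [] => []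
  | c :: t => (if PySem.Chars.isdigit c then [(count, [c])] else []) ++ pvDL t (count + 1)

theorem pvDigitLoopA_eq (cs : List Char) : ∀ (count : Int) (acc : List (Int × List Char)),
    pvDigitLoopA cs count acc = acc ++ pvDL cs count := by
  induction cs with
  | nil => intro count acc; simp [pvDigitLoopA, pvDL]
  | cons c t ih =>
      intro count acc
      simp only [pvDigitLoopA, pvDL, ih]
      split <;> simp

theorem mem_pvDL (cs : List Char) : ∀ (count : Int) (p : Int × List Char),
    p ∈ pvDL cs count ↔ ∃ (k : Nat), ∃ (h : k < cs.length),
      PySem.Chars.isdigit cs[k] = true ∧ p = (count + k, [cs[k]]) := by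
  induction cs with
  | nil => intro count p; simp [pvDL]
  | cons c t ih =>
      intro count p
      simp only [pvDL, List.mem_append, ih]
      constructor
      · rintro (hp | ⟨k, hk, hd, rfl⟩)
        · split at hp
          · rename_i hd
            simp at hp
            exact ⟨0, by simp, by simpa [hp] using hd, by simp [hp]⟩
          · simp at hp
        · refine ⟨k + 1, by simp; omega, by simpa using hd, ?_⟩
          simp; ring
      · rintro ⟨k, hk, hd, rfl⟩
        cases k with
        | zero => left; simp at hd ⊢; simp [hd]
        | succ k =>
            right
            refine ⟨k, by simp at hk; omega, by simpa using hd, ?_⟩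
            simp; ring

theorem pvDL_bound (cs : List Char) (count : Int) :
    ∀ p ∈ pvDL cs count, count ≤ p.1 := by
  intro p hp
  rcases (mem_pvDL cs count p).1 hp with ⟨k, hk, _, rfl⟩
  simp

theorem pvDL_pairwise (cs : List Char) : ∀ (count : Int),
    (pvDL cs count).Pairwise (fun a b => a.1 < b.1) := by
  induction cs with
  | nil => intro count; simp [pvDL]
  | cons c t ih =>
      intro count
      simp only [pvDL]
      split
      · simp only [List.singleton_append, List.pairwise_cons]
        exact ⟨fun p hp => lt_of_lt_of_le (by omega) (pvDL_bound t (count + 1) p hp), ih _⟩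
      · simpa using ih _

theorem pvFindLoopA_spec (cs w v : List Char) (hw : w ≠ []) :
    ∀ (fuel : Nat) (start : Nat) (acc : List (Int × List Char)),
      start ≤ cs.length → cs.length + 1 ≤ fuel + start →
      ∃ r, pvFindLoopA cs w v (start : Int) acc fuel = acc ++ r ∧
        (∀ p, p ∈ r ↔ ∃ (j : Nat), start ≤ j ∧ ∃ (h : j < cs.length),
            w <+: cs.drop j ∧ p = ((j : Int), v)) ∧
        r.Pairwise (fun a b => a.1 < b.1) := by
  intro fuel
  induction fuel with
  | zero => intro start acc h1 h2; omega
  | succ fuel ih =>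
      intro start acc h1 h2
      simp only [pvFindLoopA]
      by_cases hneg : PySem.Chars.findFrom cs w (start : Int) = -1
      · have hno : ¬ w <:+: cs.drop start :=
          (PySem.Chars.findFrom_natCast_eq_neg_one_iff cs w start h1).1 hneg
        rw [hneg]
        refine ⟨[], by simp, ?_, by simp⟩
        intro p
        simp only [List.not_mem_nil, false_iff]
        rintro ⟨j, hsj, hj, hpre, rfl⟩
        have hdd : cs.drop j = (cs.drop start).drop (j - start) := by
          rw [List.drop_drop]; congr 1; omega
        rw [hdd] at hpre
        exact hno (hpre.isInfix.trans (List.drop_suffix _ _).isInfix)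
      · obtain ⟨hge, hpre, hmin⟩ :=
          PySem.Chars.findFrom_natCast_spec cs w start h1 hneg
        set idx := PySem.Chars.findFrom cs w (start : Int) with hidx
        have h0 : (0:Int) ≤ idx := le_trans (by positivity) hge
        have hlt : idx.toNat < cs.length := by
          have hlen : w.length ≤ (cs.drop idx.toNat).length := hpre.length_le
          simp at hlen
          have : w.length ≠ 0 := by simpa using hw
          omega
        have hsi : start ≤ idx.toNat := by omega
        rw [if_pos h0]
        have hcast : idx + 1 = ((idx.toNat + 1 : Nat) : Int) := by omega
        rw [hcast]
        obtain ⟨r', heq, hmem, hpw⟩ :=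
          ih (idx.toNat + 1) (acc ++ [(idx, v)]) (by omega) (by omega)
        refine ⟨(idx, v) :: r', by rw [heq]; simp, ?_, ?_⟩
        · intro p
          simp only [List.mem_cons, hmem]
          constructor
          · rintro (rfl | ⟨j, hsj, hj, hp, rfl⟩)
            · exact ⟨idx.toNat, hsi, hlt, hpre, by simp [Int.toNat_of_nonneg h0]⟩
            · exact ⟨j, by omega, hj, hp, rfl⟩
          · rintro ⟨j, hsj, hj, hp, rfl⟩
            rcases lt_trichotomy j idx.toNat with hc | hc | hc
            · exact absurd hp (hmin j hsj hc)
            · left; subst hc; simp [Int.toNat_of_nonneg h0]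
            · exact Or.inr ⟨j, by omega, hj, hp, rfl⟩
        · refine List.pairwise_cons.2 ⟨?_, hpw⟩
          intro p hp
          rcases (hmem p).1 hp with ⟨j, hsj, hj, _, rfl⟩
          simp; omega

theorem words_prefix_eq : ∀ p ∈ pvWordsB, ∀ q ∈ pvWordsB, p.1 <+: q.1 → p = q := by decide

theorem words_ne_nil : ∀ p ∈ pvWordsB, p.1 ≠ [] := by decide

theorem words_head_not_digit :
    ∀ p ∈ pvWordsB, PySem.Chars.isdigit p.1.headI = false := by decide

theorem excl_words (p q : List Char × Char) (hp : p ∈ pvWordsB) (hq : q ∈ pvWordsB)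
    (l : List Char) (h1 : p.1 <+: l) (h2 : q.1 <+: l) : p = q := by
  rcases List.prefix_or_prefix_of_prefix h1 h2 with h | h
  · exact words_prefix_eq p hp q hq h
  · exact (words_prefix_eq q hq p hp h).symm

def pvWordFold (cs : List Char) (ws : List (List Char × Char))
    (acc : List (Int × List Char)) : List (Int × List Char) :=
  ws.foldl (fun acc wv => pvFindLoopA cs wv.1 [wv.2] 0 acc (cs.length + 1)) acc

-- A's word loop (over pyRange with pyGetD / toChars) is, definitionally, the fold of
-- pvFindLoopA over the literal table pvWordsB
theorem A_wordloop_eq (cs : List Char) (acc : List (Int × List Char)) :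
    (PySem.List.pyRange 0 (pvWordsA.length : Int) 1).foldl
      (fun acc i =>
        pvFindLoopA cs (PySem.List.pyGetD pvWordsA i []) (PySem.Int.toChars (i + 1)) 0 acc
          (cs.length + 1)) acc = pvWordFold cs pvWordsB acc := by
  rw [show PySem.List.pyRange 0 (pvWordsA.length : Int) 1 = [0,1,2,3,4,5,6,7,8] from by decide]
  simp only [List.foldl, pvWordFold, pvWordsB,
    show PySem.List.pyGetD pvWordsA 0 [] = ['o','n','e'] from by decide,
    show PySem.Int.toChars (0 + 1) = ['1'] from by decide,
    show PySem.List.pyGetD pvWordsA 1 [] = ['t','w','o'] from by decide,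
    show PySem.Int.toChars (1 + 1) = ['2'] from by decide,
    show PySem.List.pyGetD pvWordsA 2 [] = ['t','h','r','e','e'] from by decide,
    show PySem.Int.toChars (2 + 1) = ['3'] from by decide,
    show PySem.List.pyGetD pvWordsA 3 [] = ['f','o','u','r'] from by decide,
    show PySem.Int.toChars (3 + 1) = ['4'] from by decide,
    show PySem.List.pyGetD pvWordsA 4 [] = ['f','i','v','e'] from by decide,
    show PySem.Int.toChars (4 + 1) = ['5'] from by decide,
    show PySem.List.pyGetD pvWordsA 5 [] = ['s','i','x'] from by decide,
    show PySem.Int.toChars (5 + 1) = ['6'] from by decide,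
    show PySem.List.pyGetD pvWordsA 6 [] = ['s','e','v','e','n'] from by decide,
    show PySem.Int.toChars (6 + 1) = ['7'] from by decide,
    show PySem.List.pyGetD pvWordsA 7 [] = ['e','i','g','h','t'] from by decide,
    show PySem.Int.toChars (7 + 1) = ['8'] from by decide,
    show PySem.List.pyGetD pvWordsA 8 [] = ['n','i','n','e'] from by decide,
    show PySem.Int.toChars (8 + 1) = ['9'] from by decide]

theorem pvWordFold_spec (cs : List Char) :
    ∀ (ws : List (List Char × Char)), ws ⊆ pvWordsB → ws.Nodup →
    ∀ acc, ∃ r, pvWordFold cs ws acc = acc ++ r ∧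
      (∀ p, p ∈ r ↔ ∃ wv ∈ ws, ∃ (j : Nat), ∃ (h : j < cs.length),
          wv.1 <+: cs.drop j ∧ p = ((j : Int), [wv.2])) ∧
      r.Nodup := by
  intro ws
  induction ws with
  | nil => intro _ _ acc; exact ⟨[], by simp [pvWordFold], by simp, by simp⟩
  | cons wv t ih =>
      intro hsub hnd acc
      have hwv : wv ∈ pvWordsB := hsub (List.mem_cons_self)
      obtain ⟨r0, heq0, hmem0, hpw0⟩ :=
        pvFindLoopA_spec cs wv.1 [wv.2] (words_ne_nil wv hwv) (cs.length + 1) 0 acc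
          (by omega) (by omega)
      obtain ⟨r1, heq1, hmem1, hnd1⟩ :=
        ih (fun x hx => hsub (List.mem_cons_of_mem _ hx)) (List.nodup_cons.1 hnd).2
          (acc ++ r0)
      refine ⟨r0 ++ r1, ?_, ?_, ?_⟩
      · have : pvWordFold cs (wv :: t) acc
            = pvWordFold cs t (pvFindLoopA cs wv.1 [wv.2] 0 acc (cs.length + 1)) := rfl
        rw [Nat.cast_zero] at heq0
        rw [this, heq0, heq1, List.append_assoc]
      · intro p
        simp only [List.mem_append, hmem0, hmem1, List.mem_cons]
        constructor
        · rintro (⟨j, _, hj, hp, rfl⟩ | ⟨wv', hwv', j, hj, hp, rfl⟩)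
          · exact ⟨wv, Or.inl rfl, j, hj, hp, rfl⟩
          · exact ⟨wv', Or.inr hwv', j, hj, hp, rfl⟩
        · rintro ⟨wv', hwv' | hwv', j, hj, hp, rfl⟩
          · subst hwv'; exact Or.inl ⟨j, by omega, hj, hp, rfl⟩
          · exact Or.inr ⟨wv', hwv', j, hj, hp, rfl⟩
      · rw [List.nodup_append]
        have hnd0 : r0.Nodup := hpw0.imp (fun hab h => by rw [h] at hab; omega)
        refine ⟨hnd0, hnd1, ?_⟩
        intro p hp0 q hq1
        rcases (hmem0 p).1 hp0 with ⟨j, _, hj, hp, rfl⟩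
        rcases (hmem1 q).1 hq1 with ⟨wv', hwv', j', hj', hp', rfl⟩
        intro hpq
        have hjj : j = j' := by
          have := congrArg Prod.fst hpq
          simpa using this
        subst hjj
        have heqwv : wv = wv' := excl_words wv wv' hwv (hsub (List.mem_cons_of_mem _ hwv'))
          (cs.drop j) hp hp'
        exact (List.nodup_cons.1 hnd).1 (heqwv ▸ hwv')

theorem pvFirstWordB_some (l : List Char) :
    ∀ (ws : List (List Char × Char)) (v : Char), pvFirstWordB l ws = some v →
      ∃ wv ∈ ws, wv.1 <+: l ∧ v = wv.2 := by
  intro ws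
  induction ws with
  | nil => intro v h; simp [pvFirstWordB] at h
  | cons q t ih =>
      intro v h
      rcases q with ⟨w, d⟩
      simp only [pvFirstWordB] at h
      split at h
      · rename_i hs
        exact ⟨(w, d), List.mem_cons_self, (PySem.Chars.startswith_iff l w).1 hs, by
          simpa using h.symm⟩
      · rcases ih v h with ⟨wv, hwv, hp, rfl⟩
        exact ⟨wv, List.mem_cons_of_mem _ hwv, hp, rfl⟩

theorem pvFirstWordB_of_mem (l : List Char) (wv : List Char × Char)
    (hwvB : wv ∈ pvWordsB) (hp : wv.1 <+: l) :
    ∀ (ws : List (List Char × Char)), ws ⊆ pvWordsB → wv ∈ ws →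
      pvFirstWordB l ws = some wv.2 := by
  intro ws
  induction ws with
  | nil => intro _ h; simp at h
  | cons q t ih =>
      intro hsub hmem
      obtain ⟨w, d⟩ := q
      simp only [pvFirstWordB]
      by_cases hs : PySem.Chars.startswith l w = true
      · rw [if_pos hs]
        have heq : (w, d) = wv := excl_words (w, d) wv (hsub List.mem_cons_self) hwvB l
          ((PySem.Chars.startswith_iff l w).1 hs) hp
        rw [← heq]
      · rw [if_neg hs]
        have hne : wv ≠ (w, d) := by
          rintro rfl
          exact hs ((PySem.Chars.startswith_iff l w).2 hp)
        refine ih (fun x hx => hsub (List.mem_cons_of_mem _ hx)) ?_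
        rcases List.mem_cons.1 hmem with h | h
        · exact absurd h hne
        · exact h

theorem word_at_not_digit (cs : List Char) (j : Nat) (hj : j < cs.length)
    (wv : List Char × Char) (hwv : wv ∈ pvWordsB) (hp : wv.1 <+: cs.drop j) :
    PySem.Chars.isdigit cs[j] = false := by
  rcases hw : wv.1 with _ | ⟨c0, wr⟩
  · exact absurd hw (words_ne_nil wv hwv)
  · rcases hp with ⟨tail, htail⟩
    have hhead : (cs.drop j).head? = some c0 := by
      rw [← htail, hw]; rfl
    rw [List.head?_drop, List.getElem?_eq_getElem hj] at hhead
    have hc : cs[j] = c0 := by simpa using hhead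
    have := words_head_not_digit wv hwv
    rw [hw] at this
    simpa [hc] using this

theorem pvMatchB_eq_some_iff (cs : List Char) (i : Nat) (hi : i < cs.length) (c : Char) :
    pvMatchB cs i = some c ↔
      ((PySem.Chars.isdigit cs[i] = true ∧ c = cs[i]) ∨
       ∃ wv ∈ pvWordsB, wv.1 <+: cs.drop i ∧ c = wv.2) := by
  have hm : pvMatchB cs i
      = if PySem.Chars.isdigit cs[i] then some cs[i]
        else pvFirstWordB (cs.drop i) pvWordsB := by
    unfold pvMatchB
    rw [List.getElem?_eq_getElem hi]
  rw [hm]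
  by_cases hd : PySem.Chars.isdigit cs[i] = true
  · rw [if_pos hd]
    constructor
    · intro h; exact Or.inl ⟨hd, by simpa using h.symm⟩
    · rintro (⟨_, rfl⟩ | ⟨wv, hwv, hp, rfl⟩)
      · rfl
      · exact absurd hd (by simp [word_at_not_digit cs i hi wv hwv hp])
  · rw [if_neg hd]
    constructor
    · intro h
      rcases pvFirstWordB_some _ _ _ h with ⟨wv, hwv, hp, rfl⟩
      exact Or.inr ⟨wv, hwv, hp, rfl⟩
    · rintro (⟨hdd, _⟩ | ⟨wv, hwv, hp, rfl⟩)
      · exact absurd hdd hd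
      · exact pvFirstWordB_of_mem _ wv hwv hp pvWordsB (fun x hx => hx) hwv

theorem mem_pvMA (cs : List Char) (p : Int × List Char) :
    p ∈ pvMA cs ↔ ∃ (i : Nat), ∃ (h : i < cs.length), ∃ c,
      pvMatchB cs i = some c ∧ p = ((i : Int), [c]) := by
  simp only [pvMA, pvM, List.mem_map, List.mem_filterMap, List.mem_range,
    Option.map_eq_some_iff]
  constructor
  · rintro ⟨⟨j, d⟩, ⟨i, hi, c, hc, heq⟩, rfl⟩
    obtain ⟨rfl, rfl⟩ : i = j ∧ c = d := by
      constructor <;> [exact (congrArg Prod.fst heq); exact (congrArg Prod.snd heq)]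
    exact ⟨i, hi, c, hc, rfl⟩
  · rintro ⟨i, hi, c, hc, rfl⟩
    exact ⟨(i, c), ⟨i, hi, c, hc, rfl⟩, rfl⟩

theorem pvM_pairwise (cs : List Char) : (pvM cs).Pairwise (fun a b => a.1 < b.1) := by
  refine List.Pairwise.filterMap _ ?_ (List.pairwise_lt_range)
  intro a a' h b hb b' hb'
  rcases Option.map_eq_some_iff.1 hb with ⟨c, _, rfl⟩
  rcases Option.map_eq_some_iff.1 hb' with ⟨c', _, rfl⟩
  simpa using h

theorem pvMA_pairwise (cs : List Char) :
    (pvMA cs).Pairwise (fun a b => a.1 < b.1) := by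
  refine List.Pairwise.map _ ?_ (pvM_pairwise cs)
  intro a b hab
  simpa using hab

theorem pvMA_nodup (cs : List Char) : (pvMA cs).Nodup :=
  (pvMA_pairwise cs).imp (fun hab h => by rw [h] at hab; omega)


theorem B_fold (cs : List Char) : ∀ (n : Nat),
    (List.range n).foldl
      (fun (s : Option Char × Option Char) i =>
        match pvMatchB cs i with
        | some d => (some (s.1.getD d), some d)
        | none => s) (none, none)
    = ((((List.range n).filterMap (fun i => (pvMatchB cs i).map ((i, ·)))).head?.map (·.2)),
       (((List.range n).filterMap (fun i => (pvMatchB cs i).map ((i, ·)))).getLast?.map (·.2)))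
    := by
  intro n
  induction n with
  | zero => simp
  | succ n ih =>
      rw [List.range_succ, List.foldl_append, List.filterMap_append, ih]
      rcases h : pvMatchB cs n with _ | d
      · simp [h]
      · simp only [List.foldl, h, List.filterMap, Option.map_some]
        rw [List.getLast?_concat]
        rcases hM : (List.range n).filterMap (fun i => (pvMatchB cs i).map ((i, ·))) with
          _ | ⟨m0, t⟩
        · simp
        · simp

theorem main_eq (line : String) : calib_value line = calib_value_alt line := by
  simp only [calib_value, calib_value_alt]
  rw [pvDigitLoopA_eq, A_wordloop_eq]
  obtain ⟨R, hR, hmemR, hndR⟩ :=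
    pvWordFold_spec line.toList pvWordsB (fun x hx => hx) (by decide) ([] ++ pvDL line.toList 0)
  rw [hR]
  have hmem_iff : ∀ a, a ∈ pvMA line.toList ↔ a ∈ [] ++ pvDL line.toList 0 ++ R := by
    intro a
    rw [mem_pvMA, List.nil_append, List.mem_append, mem_pvDL, hmemR]
    constructor
    · rintro ⟨i, hi, c, hc, rfl⟩
      rcases (pvMatchB_eq_some_iff line.toList i hi c).1 hc with ⟨hd, rfl⟩ | ⟨wv, hwv, hp, rfl⟩
      · exact Or.inl ⟨i, hi, hd, by simp⟩
      · exact Or.inr ⟨wv, hwv, i, hi, hp, rfl⟩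
    · rintro (⟨k, hk, hd, rfl⟩ | ⟨wv, hwv, j, hj, hp, rfl⟩)
      · exact ⟨k, hk, _, (pvMatchB_eq_some_iff line.toList k hk _).2 (Or.inl ⟨hd, rfl⟩), by simp⟩
      · exact ⟨j, hj, wv.2, (pvMatchB_eq_some_iff line.toList j hj _).2
          (Or.inr ⟨wv, hwv, hp, rfl⟩), rfl⟩
  have hnodup : ([] ++ pvDL line.toList 0 ++ R).Nodup := by
    rw [List.nil_append, List.nodup_append]
    refine ⟨(pvDL_pairwise line.toList 0).imp (fun hab h => by rw [h] at hab; omega),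
      hndR, ?_⟩
    intro a ha b hb hab
    rcases (mem_pvDL line.toList 0 a).1 ha with ⟨k, hk, hd, rfl⟩
    rcases (hmemR b).1 hb with ⟨wv, hwv, j, hj, hp, rfl⟩
    have hkj : k = j := by
      have := congrArg Prod.fst hab
      simpa using this
    subst hkj
    rw [word_at_not_digit line.toList k hk wv hwv hp] at hd
    exact absurd hd (by simp)
  have hsorted : PySem.List.sorted ([] ++ pvDL line.toList 0 ++ R) (fun p => p.1) false
      = pvMA line.toList :=
    PySem.List.sorted_eq_of_perm_of_pairwise_lt _ _ _
      ((List.perm_ext_iff_of_nodup (pvMA_nodup line.toList) hnodup).2 hmem_iff)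
      (pvMA_pairwise line.toList)
  rw [hsorted, B_fold line.toList line.toList.length]
  rcases hM : pvM line.toList with _ | ⟨m0, t⟩
  · have : pvMA line.toList = [] := by simp [pvMA, hM]
    rw [show (List.range line.toList.length).filterMap
        (fun i => (pvMatchB line.toList i).map ((i, ·))) = pvM line.toList from rfl, hM, this]
    rfl
  · rcases hlast : (pvM line.toList).getLast? with _ | lst
    · rw [List.getLast?_eq_none_iff] at hlast
      simp [hM] at hlast
    · have hMA : pvMA line.toList = ((m0.1 : Int), [m0.2]) ::
          t.map (fun p => ((p.1 : Int), [p.2])) := by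
        simp [pvMA, hM]
      have h0 : PySem.List.pyGet? (pvMA line.toList) 0 = some ((m0.1 : Int), [m0.2]) := by
        rw [PySem.List.pyGet?_zero, hMA]; rfl
      have h1 : PySem.List.pyGet? (pvMA line.toList) (-1)
          = some ((lst.1 : Int), [lst.2]) := by
        rw [PySem.List.pyGet?_neg_one, pvMA, List.getLast?_map, hlast]; rfl
      rw [h0, h1]
      rw [show (List.range line.toList.length).filterMap
        (fun i => (pvMatchB line.toList i).map ((i, ·))) = pvM line.toList from rfl, hM]
      rw [hM] at hlast
      rw [hlast]
      simp

-- ===== VERDICT (by name: the statement is the Claim_ definition above) =====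
theorem calib_value_spec : Claim_equal_calib_value := by
  intro line _ _
  show calib_value line = calib_value_alt line
  exact main_eq line
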